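-- pv_equiv track=rewrite | github.com/hailingfang/ribo-seq-workflow | low-dose/4-read-distribution-along-mRNA/scripts/plot-read-postion-and-distribution.py | transfer_to_codon
-- ===== SOURCE A (Python) =====
-- def transfer_to_codon(base_pos, counting):
--     dt = {}
--     for idx, xx in enumerate(base_pos):
--         key = xx // 3
--         if key in dt:
--             dt[key] += counting[idx]
--         else:
--             dt[key] = counting[idx]
--
--     x = list(dt.keys())
--     x.sort()
--     y = [dt[xx] for xx in x]
--
--     return x, y
-- ===== SOURCE B (Python) =====
-- def transfer_to_codon(base_pos, counting):
--     pairs = sorted(((xx // 3, counting[idx]) for idx, xx in enumerate(base_pos)),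
--                    key=lambda p: p[0])
--     x, y = [], []
--     for k, v in pairs:
--         if x and x[-1] == k:
--             y[-1] += v
--         else:
--             x.append(k)
--             y.append(v)
--     return x, y
-- ===== Notes on version B (the rewrite author's own statement) =====
-- stated objective: alternative
-- what changed: Replaces the dict accumulation plus key sort by building (codon,count) pairs, sorting them by codon once, and folding duplicates in a single linear sweep over the sorted pairs.
import Mathlib
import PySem

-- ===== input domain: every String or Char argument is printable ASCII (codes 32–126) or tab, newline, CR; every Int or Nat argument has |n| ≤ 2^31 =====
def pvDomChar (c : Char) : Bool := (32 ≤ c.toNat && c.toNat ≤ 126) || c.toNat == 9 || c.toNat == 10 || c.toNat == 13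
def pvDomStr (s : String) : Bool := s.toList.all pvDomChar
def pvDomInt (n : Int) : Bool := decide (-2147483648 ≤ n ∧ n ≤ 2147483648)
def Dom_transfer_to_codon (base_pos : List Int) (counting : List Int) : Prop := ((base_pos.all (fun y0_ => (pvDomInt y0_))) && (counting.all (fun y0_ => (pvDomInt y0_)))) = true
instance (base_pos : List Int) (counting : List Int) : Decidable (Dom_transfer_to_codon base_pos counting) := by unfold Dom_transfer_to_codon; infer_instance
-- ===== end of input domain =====

-- B replaces A's dict accumulation + key sort by sorting the (codon, count) pairs once and
-- folding duplicate codons in a single linear sweep over the sorted pairs (objective: alternative).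

-- ===== PORT A =====
def transfer_to_codon (base_pos : List Int) (counting : List Int) : List Int × List Int :=
  let dt := (PySem.List.enumerate base_pos).foldl (fun dt q =>
      let key := PySem.Int.floordiv q.2 3
      if dt.contains key then
        dt.insert key (dt.getD key 0 + (PySem.List.pyGet? counting q.1).getD 0)
      else
        dt.insert key ((PySem.List.pyGet? counting q.1).getD 0)) PySem.Dict.empty
  let x := PySem.List.sorted dt.keys (fun xx => xx) false
  let y := x.map (fun xx => dt.getD xx 0)
  (x, y)

-- ===== PORT B =====
def transfer_to_codon_alt (base_pos : List Int) (counting : List Int) : List Int × List Int :=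
  let pairs := PySem.List.sorted
      ((PySem.List.enumerate base_pos).map
        (fun q => (PySem.Int.floordiv q.2 3, (PySem.List.pyGet? counting q.1).getD 0)))
      (fun p => p.1) false
  pairs.foldl (fun acc p =>
      if PySem.List.pyGet? acc.1 (-1) = some p.1 then
        (acc.1, acc.2.dropLast ++ [(PySem.List.pyGet? acc.2 (-1)).getD 0 + p.2])
      else
        (acc.1 ++ [p.1], acc.2 ++ [p.2])) ([], [])

-- ===== PRECONDITION & SPEC =====
-- Pre_ excludes exactly the inputs where A raises IndexError: counting shorter than base_pos.
def Pre_transfer_to_codon (base_pos : List Int) (counting : List Int) : Prop :=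
  base_pos.length ≤ counting.length
instance (base_pos : List Int) (counting : List Int) : Decidable (Pre_transfer_to_codon base_pos counting) := by unfold Pre_transfer_to_codon; infer_instance
def pvWitness_transfer_to_codon : List Int × List Int := ([7, -4, 6, 8], [1, 2, 3, 4])

def Spec_transfer_to_codon (base_pos : List Int) (counting : List Int) (out : List Int × List Int) : Prop := out = transfer_to_codon_alt base_pos counting
instance (base_pos : List Int) (counting : List Int) (out : List Int × List Int) : Decidable (Spec_transfer_to_codon base_pos counting out) := by unfold Spec_transfer_to_codon; infer_instance

-- ===== CLAIM (what is proved, stated in full; the proofs are below) =====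
def Claim_equal_transfer_to_codon : Prop := ∀ (base_pos : List Int) (counting : List Int), Dom_transfer_to_codon base_pos counting → Pre_transfer_to_codon base_pos counting → Spec_transfer_to_codon base_pos counting (transfer_to_codon base_pos counting)

-- ===== LEMMAS AND PROOFS =====

-- total value of key k among the pairs
def sumKey (qs : List (Int × Int)) (k : Int) : Int :=
  ((qs.filter (fun p => p.1 == k)).map (·.2)).sum

lemma sumKey_append_singleton (qs : List (Int × Int)) (p : Int × Int) (k : Int) :
    sumKey (qs ++ [p]) k = sumKey qs k + (if p.1 = k then p.2 else 0) := by
  simp [sumKey, List.filter_append]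
  split_ifs <;> simp_all

lemma sumKey_eq_zero_of_not_mem (qs : List (Int × Int)) (k : Int) (h : k ∉ qs.map (·.1)) :
    sumKey qs k = 0 := by
  have : qs.filter (fun p => p.1 == k) = [] := by
    rw [List.filter_eq_nil_iff]
    intro p hp hk
    exact h (List.mem_map.mpr ⟨p, hp, by simpa using hk⟩)
  simp [sumKey, this]

lemma sumKey_perm (qs ps : List (Int × Int)) (h : qs.Perm ps) (k : Int) :
    sumKey qs k = sumKey ps k := by
  exact ((h.filter _).map _).sum_eq

-- PySem.Set.ofList is a sublist of its argument
lemma ofList_sublist {α : Type} [BEq α] [LawfulBEq α] (L : List α) :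
    (PySem.Set.ofList L).Sublist L := by
  induction L using List.reverseRecOn with
  | nil => simp [PySem.Set.ofList_nil]
  | append_singleton l a ih =>
    rw [PySem.Set.ofList_append_singleton, PySem.Set.add_eq_ite]
    split_ifs
    · exact ih.trans (List.sublist_append_left l [a])
    · exact ih.append (List.Sublist.refl [a])

lemma ofList_pairwise_lt (L : List Int) (h : L.Pairwise (· ≤ ·)) :
    (PySem.Set.ofList L).Pairwise (· < ·) := by
  have hle : (PySem.Set.ofList L).Pairwise (· ≤ ·) := h.sublist (ofList_sublist L)
  have hnd : (PySem.Set.ofList L).Nodup := PySem.Set.nodup_ofList L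
  exact (List.Pairwise.and hnd hle).imp (fun h => lt_of_le_of_ne h.2 h.1)

-- in an ascending list every member is ≤ the last element
lemma mem_le_getLast (l : List Int) (h : l.Pairwise (· ≤ ·)) (x : Int) (hx : x ∈ l)
    (hne : l ≠ []) : x ≤ l.getLast hne := by
  induction l with
  | nil => cases hx
  | cons a t ih =>
    cases t with
    | nil => simp at hx; simp [hx, List.getLast]
    | cons b u =>
      rcases List.mem_cons.mp hx with rfl | hxt
      · have := (List.pairwise_cons.mp h).1
        calc x ≤ (b :: u).getLast (by simp) := this _ (List.getLast_mem _)
          _ = (x :: b :: u).getLast (by simp) := (List.getLast_cons (by simp)).symm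
      · have := ih (List.pairwise_cons.mp h).2 hxt (by simp)
        calc x ≤ (b :: u).getLast (by simp) := this
          _ = (a :: b :: u).getLast (by simp) := (List.getLast_cons (by simp)).symm

-- last element of set(L) for L ascending with maximum a present
lemma getLast?_ofList_max (L : List Int) (a : Int) (h : L.Pairwise (· ≤ ·))
    (ha : a ∈ L) (hmax : ∀ x ∈ L, x ≤ a) :
    (PySem.Set.ofList L).getLast? = some a := by
  have hmem : a ∈ PySem.Set.ofList L := (PySem.Set.mem_ofList L a).mpr ha
  have hne : PySem.Set.ofList L ≠ [] := by intro h0; rw [h0] at hmem; cases hmem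
  have hpw : (PySem.Set.ofList L).Pairwise (· ≤ ·) := h.sublist (ofList_sublist L)
  have h1 : a ≤ (PySem.Set.ofList L).getLast hne := mem_le_getLast _ hpw a hmem hne
  have h2 : (PySem.Set.ofList L).getLast hne ≤ a :=
    hmax _ ((PySem.Set.mem_ofList L _).mp (List.getLast_mem hne))
  rw [List.getLast?_eq_some_getLast hne, le_antisymm h2 h1]

-- the merge sweep of B on a key-ascending pair list
lemma merge_foldl (qs : List (Int × Int)) (h : (qs.map (·.1)).Pairwise (· ≤ ·)) :
    qs.foldl (fun acc p =>
      if PySem.List.pyGet? acc.1 (-1) = some p.1 then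
        (acc.1, acc.2.dropLast ++ [(PySem.List.pyGet? acc.2 (-1)).getD 0 + p.2])
      else
        (acc.1 ++ [p.1], acc.2 ++ [p.2])) ([], [])
    = (PySem.Set.ofList (qs.map (·.1)),
       (PySem.Set.ofList (qs.map (·.1))).map (sumKey qs)) := by
  induction qs using List.reverseRecOn with
  | nil => simp [PySem.Set.ofList_nil]
  | append_singleton l p ih =>
    rw [List.map_append] at h ⊢
    rw [List.pairwise_append] at h
    obtain ⟨hl, -, hcross⟩ := h
    have hmax : ∀ x ∈ l.map (·.1), x ≤ p.1 := fun x hx => hcross x hx p.1 (by simp)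
    rw [List.foldl_append, ih hl, List.foldl_cons, List.foldl_nil]
    simp only [List.map_cons, List.map_nil]
    set S := PySem.Set.ofList (l.map (·.1)) with hSdef
    rw [PySem.Set.ofList_append_singleton]
    by_cases hp : p.1 ∈ l.map (·.1)
    · -- last codon repeats: fold into the last slot
      have hlast : S.getLast? = some p.1 := getLast?_ofList_max _ _ hl hp hmax
      obtain ⟨S', hS⟩ := List.getLast?_eq_some_iff.mp hlast
      have hnodup : S.Nodup := PySem.Set.nodup_ofList _
      have hp1S' : p.1 ∉ S' := by
        rw [hS] at hnodup
        exact fun hmem => (List.disjoint_of_nodup_append hnodup) hmem (by simp)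
      have hcond : PySem.List.pyGet? S (-1) = some p.1 := by
        rw [PySem.List.pyGet?_neg_one, hlast]
      rw [if_pos hcond, PySem.Set.add_of_mem ((PySem.Set.mem_ofList _ _).mpr hp)]
      refine Prod.ext rfl ?_
      have hmapcongr : ∀ k ∈ S', sumKey (l ++ [p]) k = sumKey l k := by
        intro k hk
        rw [sumKey_append_singleton, if_neg (fun he => hp1S' (by rw [he]; exact hk)),
          add_zero]
      rw [← hSdef, hS]
      simp only [List.map_append, List.map_cons, List.map_nil, List.dropLast_concat,
        PySem.List.pyGet?_neg_one_append_singleton, Option.getD_some]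
      rw [List.map_congr_left hmapcongr, sumKey_append_singleton, if_pos rfl]
    · -- new codon: append a fresh slot
      have hcond : ¬ (PySem.List.pyGet? S (-1) = some p.1) := by
        rw [PySem.List.pyGet?_neg_one]
        intro heq
        obtain ⟨S', hS⟩ := List.getLast?_eq_some_iff.mp heq
        exact hp ((PySem.Set.mem_ofList _ _).mp (by rw [← hSdef, hS]; simp))
      rw [if_neg hcond,
        PySem.Set.add_of_not_mem (fun hmem => hp ((PySem.Set.mem_ofList _ _).mp hmem))]
      refine Prod.ext rfl ?_
      have hmapcongr : ∀ k ∈ S, sumKey (l ++ [p]) k = sumKey l k := by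
        intro k hk
        have hne2 : k ≠ p.1 := fun he =>
          hp (by rw [← he]; exact (PySem.Set.mem_ofList _ _).mp hk)
        rw [sumKey_append_singleton, if_neg (fun he => hne2 he.symm), add_zero]
      rw [← hSdef]
      simp only [List.map_append, List.map_cons, List.map_nil]
      rw [List.map_congr_left hmapcongr,
        sumKey_append_singleton, if_pos rfl, sumKey_eq_zero_of_not_mem _ _ hp, zero_add]

-- A's dict fold computes sumKey
lemma getD_foldl_insert_sum (qs : List (Int × Int)) (d : PySem.Dict Int Int) (k : Int) :
    (qs.foldl (fun d p => d.insert p.1 (d.getD p.1 0 + p.2)) d).getD k 0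
      = d.getD k 0 + sumKey qs k := by
  induction qs generalizing d with
  | nil => simp [sumKey]
  | cons q t ih =>
    rw [List.foldl_cons, ih]
    by_cases hk : k = q.1
    · subst hk
      rw [PySem.Dict.getD_insert_self]
      simp [sumKey]
      ring
    · rw [PySem.Dict.getD_insert_of_ne _ _ _ hk]
      have hqk : (q.1 == k) = false := by simpa using fun he => hk he.symm
      simp [sumKey, hqk]

set_option maxHeartbeats 1000000 in
theorem transfer_to_codon_spec : Claim_equal_transfer_to_codon := by
  intro base_pos counting _ _
  unfold Spec_transfer_to_codon transfer_to_codon transfer_to_codon_alt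
  dsimp only
  set ps : List (Int × Int) := (PySem.List.enumerate base_pos).map
      (fun q => (PySem.Int.floordiv q.2 3, (PySem.List.pyGet? counting q.1).getD 0))
    with hps
  -- A's loop is the canonical insert-accumulate fold over ps
  have hA : (PySem.List.enumerate base_pos).foldl (fun dt q =>
      let key := PySem.Int.floordiv q.2 3
      if dt.contains key then
        dt.insert key (dt.getD key 0 + (PySem.List.pyGet? counting q.1).getD 0)
      else
        dt.insert key ((PySem.List.pyGet? counting q.1).getD 0)) PySem.Dict.empty
      = ps.foldl (fun d p => d.insert p.1 (d.getD p.1 0 + p.2)) PySem.Dict.empty := by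
    rw [hps, List.foldl_map]
    apply PySem.List.foldl_congr_mem
    intro d q _
    dsimp only
    by_cases hc : d.contains (PySem.Int.floordiv q.2 3)
    · rw [if_pos hc]
    · rw [if_neg hc, PySem.Dict.getD_of_not_contains _ _ (by simpa using hc), zero_add]
  rw [hA]
  set dt := ps.foldl (fun d p => d.insert p.1 (d.getD p.1 0 + p.2)) PySem.Dict.empty
    with hdt
  have hkeys : dt.keys = PySem.Set.ofList (ps.map (·.1)) := by
    rw [hdt, PySem.Dict.keys_foldl_insert_key ps (·.1)
      (fun d p => d.getD p.1 0 + p.2) PySem.Dict.empty]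
    rw [PySem.Dict.keys_empty, PySem.Set.update_nil_left]
  have hgetD : ∀ k, dt.getD k 0 = sumKey ps k := by
    intro k
    rw [hdt, getD_foldl_insert_sum, PySem.Dict.getD_empty, zero_add]
  -- B's sorted pair list
  set qs := PySem.List.sorted ps (fun p => p.1) false with hqs
  have hqperm : qs.Perm ps := PySem.List.sorted_perm ps (fun p => p.1) false
  have hqpw : (qs.map (·.1)).Pairwise (· ≤ ·) := by
    simpa using PySem.List.sorted_map_key_pairwise ps (fun p => p.1)
  rw [merge_foldl qs hqpw]
  -- the two key lists coincide
  have hx : PySem.List.sorted dt.keys (fun xx => xx) false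
      = PySem.Set.ofList (qs.map (·.1)) := by
    rw [hkeys]
    apply PySem.List.sorted_eq_of_perm_of_pairwise_lt
    · apply (List.perm_ext_iff_of_nodup (PySem.Set.nodup_ofList _)
        (PySem.Set.nodup_ofList _)).mpr
      intro a
      rw [PySem.Set.mem_ofList, PySem.Set.mem_ofList]
      exact (hqperm.map (·.1)).mem_iff
    · exact ofList_pairwise_lt _ hqpw
  rw [hx]
  refine Prod.ext rfl ?_
  apply List.map_congr_left
  intro k _
  rw [hgetD k, sumKey_perm qs ps hqperm k]
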